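/- GENERATED by farm/mkstatement.py from design/units.tsv (unit `start_decoder.C8d`) and the assertions of Vorbis/Spec/StartDecoderC8.lean — do not edit.
   THE STATEMENT of the proof unit `start_decoder.C8d`: segment C8d of `start_decoder` (12 instructions; entries 0x114a8c;
   exits 0x114710; ranges 0x114a8c-0x114ac4)
   takes each of its entry assertions to one of its exit assertions (`Vorbis.Spec.StartDecoder.SegC8d`), given the contracts of its callees.
   What the names mean: Vorbis/Spec/Basic.lean (the shared hypotheses), Vorbis/Spec/StartDecoderC8.lean (the assertions). The theorem to prove:
   `theorem start_decoder_C8d_ok : Vorbis.Spec.start_decoder_C8d.Statement`. -/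
import Vorbis.Spec.Codebook
import Vorbis.Spec.StartDecoderC8
namespace Vorbis.Spec.start_decoder_C8d
open X86 X86.User Asan

/-- The statement of unit `start_decoder.C8d`. -/
def Statement : Prop :=
  ∀ (Lay : Layout) (_hLay : Lay.hi = 0x1000000) (μ : Microarch) (_hμ : UserX.MicroOK μ) (u₀ : State)
    (_hcode : HasCodeNat Lay u₀ Vorbis.L.start_decoder.entry Vorbis.Code.code_start_decoder.nat Vorbis.L.start_decoder.size)
    (_h_asan_load8_noabort : Asan.SmallCheck Lay μ Vorbis.WayInv (Vorbis.CodeOK u₀) [.rax, .rcx, .rdx] 8 Vorbis.L.__asan_load8_noabort.entry)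
    (_h_asan_store4_noabort : Asan.SmallCheck Lay μ Vorbis.WayInv (Vorbis.CodeOK u₀) [.rax, .rcx, .rdx] 4 Vorbis.L.__asan_store4_noabort.entry)
    (_h_compute_sorted_huffman : ∀ (others : List Obj) (frames : List (Nat × FrameLayout)) (Blk : Block → Prop), Calls Lay μ Vorbis.WayInv (Vorbis.conv u₀) Vorbis.L.compute_sorted_huffman.entry (Vorbis.Spec.compute_sorted_huffman.spec others frames Blk)),
    Vorbis.Spec.StartDecoder.SegC8d Lay μ u₀

end Vorbis.Spec.start_decoder_C8d
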